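-- pv_equiv track=rewrite | github.com/matel2394/project | Python.git/Cos Pro 2/빈칸 채우기 모의고사/문제 5.py | solution
-- ===== SOURCE A (Python) =====
-- def solution(member,trasportation):
--     counter = 0
--     if trasportation == "bus":
--         for i in member:
--             if len(member) >= 10:
--                 if i < 20:
--                     counter += 15000 * 80 // 100
--                 elif i >= 20:
--                     counter += 40000 * 90 // 100
--             else:
--                 if i < 20:
--                     counter += 15000
--                 elif i >= 20:
--                     counter += 40000
--
--     if trasportation == "ship":
--         for i in member:
--             if len(member) >= 10:
--                 if i < 20:
--                    counter += 13000 * 80//100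
--                 elif i >= 20:
--                     counter += 30000 * 90//100
--             else:
--                 if i < 20:
--                     counter += 13000
--                 elif i >= 20:
--                     counter += 30000
--     if trasportation == "airplane":
--         for i in member:
--             if len(member) >= 10:
--                 if i < 20:
--                    counter += 45000 * 80//100
--                 elif i >= 20:
--                     counter += 70000 * 90//100
--             else:
--                 if i < 20:
--                     counter += 45000
--                 elif i >= 20:
--                     counter += 70000
--     return counter
-- ===== SOURCE B (Python) =====
-- PRICES = {"bus": (15000, 40000), "ship": (13000, 30000), "airplane": (45000, 70000)}
--
-- def solution(member, trasportation):
--     prices = PRICES.get(trasportation)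
--     if prices is None:
--         return 0
--     young_price, old_price = prices
--     if len(member) >= 10:
--         young_price = young_price * 80 // 100
--         old_price = old_price * 90 // 100
--     young = sum(1 for i in member if i < 20)
--     old = sum(1 for i in member if i >= 20)
--     return young * young_price + old * old_price
-- ===== Notes on version B (the rewrite author's own statement) =====
-- stated objective: simpler
-- what changed: Replaces three copy-pasted per-transport accumulation loops (with the discount test re-evaluated per member) by a price table lookup, a single discount adjustment, and two counts (young/old) multiplied by the unit prices.
import Mathlib
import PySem

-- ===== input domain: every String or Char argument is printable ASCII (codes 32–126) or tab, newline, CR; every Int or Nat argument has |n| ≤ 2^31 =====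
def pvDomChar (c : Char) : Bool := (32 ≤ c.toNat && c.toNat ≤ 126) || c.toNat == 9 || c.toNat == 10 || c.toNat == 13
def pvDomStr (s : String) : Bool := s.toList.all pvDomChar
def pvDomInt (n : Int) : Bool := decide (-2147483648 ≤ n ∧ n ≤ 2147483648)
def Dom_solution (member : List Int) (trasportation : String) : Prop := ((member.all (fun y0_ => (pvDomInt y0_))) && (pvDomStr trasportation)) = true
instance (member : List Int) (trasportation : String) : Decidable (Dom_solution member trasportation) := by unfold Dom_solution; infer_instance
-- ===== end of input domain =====

-- B replaces A's three copy-pasted per-transport loops by a price-table lookup, one discount adjustment, and young/old counts (objective: simpler); return value only, no mutation.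


-- ===== PORT A =====
def solution (member : List Int) (trasportation : String) : Int :=
  let counter : Int := 0
  let counter :=
    if trasportation == "bus" then
      member.foldl (fun counter i =>
        if (10:Int) <= member.length then
          (if i < 20 then counter + PySem.Int.floordiv (15000 * 80) 100
           else if (20:Int) <= i then counter + PySem.Int.floordiv (40000 * 90) 100
           else counter)
        else
          (if i < 20 then counter + 15000
           else if (20:Int) <= i then counter + 40000
           else counter)) counter
    else counter
  let counter :=
    if trasportation == "ship" then
      member.foldl (fun counter i =>
        if (10:Int) <= member.length then
          (if i < 20 then counter + PySem.Int.floordiv (13000 * 80) 100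
           else if (20:Int) <= i then counter + PySem.Int.floordiv (30000 * 90) 100
           else counter)
        else
          (if i < 20 then counter + 13000
           else if (20:Int) <= i then counter + 30000
           else counter)) counter
    else counter
  let counter :=
    if trasportation == "airplane" then
      member.foldl (fun counter i =>
        if (10:Int) <= member.length then
          (if i < 20 then counter + PySem.Int.floordiv (45000 * 80) 100
           else if (20:Int) <= i then counter + PySem.Int.floordiv (70000 * 90) 100
           else counter)
        else
          (if i < 20 then counter + 45000
           else if (20:Int) <= i then counter + 70000
           else counter)) counter
    else counter
  counter

-- ===== PORT B =====
-- B: price table + one discount adjustment + two counts (sum(1 for ...) ported as countP)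
def pvPriceTable : PySem.Dict String (Int × Int) :=
  ((PySem.Dict.empty.insert "bus" (15000, 40000)).insert "ship" (13000, 30000)).insert "airplane" (45000, 70000)

def solution_alt (member : List Int) (trasportation : String) : Int :=
  match pvPriceTable.get? trasportation with
  | none => 0
  | some (yp, op) =>
    let young_price := if (10:Int) <= member.length then PySem.Int.floordiv (yp * 80) 100 else yp
    let old_price := if (10:Int) <= member.length then PySem.Int.floordiv (op * 90) 100 else op
    let young : Int := member.countP (fun i => decide (i < 20))
    let old : Int := member.countP (fun i => decide ((20:Int) <= i))
    young * young_price + old * old_price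

-- ===== PRECONDITION & SPEC =====
def Spec_solution (member : List Int) (trasportation : String) (out : Int) : Prop := out = solution_alt member trasportation
instance (member : List Int) (trasportation : String) (out : Int) : Decidable (Spec_solution member trasportation out) := by unfold Spec_solution; infer_instance

-- ===== CLAIM (what is proved, stated in full; the proofs are below) =====
def Claim_equal_solution : Prop := ∀ (member : List Int) (trasportation : String), Dom_solution member trasportation → Spec_solution member trasportation (solution member trasportation)

-- ===== LEMMAS AND PROOFS =====
lemma fold_price (p q : Int) :
    ∀ (m : List Int) (c : Int),
      m.foldl (fun counter i => if i < 20 then counter + p else if (20:Int) <= i then counter + q else counter) c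
        = c + (m.countP (fun i => decide (i < 20)) : Int) * p
            + (m.countP (fun i => decide ((20:Int) <= i)) : Int) * q := by
  intro m
  induction m with
  | nil => intro c; simp
  | cons a t ih =>
    intro c
    simp only [List.foldl_cons, List.countP_cons, ih]
    by_cases h : a < 20
    · have h2 : ¬ (20:Int) <= a := by omega
      simp [h, h2]
      ring
    · have h2 : (20:Int) <= a := by omega
      simp [h, h2]
      ring

lemma solution_eq_alt_known (member : List Int) (t : String) (yp op : Int)
    (hget : pvPriceTable.get? t = some (yp, op))
    (hsum : solution member t
      = (member.countP (fun i => decide (i < 20)) : Int)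
          * (if (10:Int) <= member.length then PySem.Int.floordiv (yp * 80) 100 else yp)
        + (member.countP (fun i => decide ((20:Int) <= i)) : Int)
          * (if (10:Int) <= member.length then PySem.Int.floordiv (op * 90) 100 else op)) :
    solution member t = solution_alt member t := by
  rw [hsum]; unfold solution_alt; rw [hget]

lemma solution_case (member : List Int) (t : String) (b0 o0 : Int)
    (ht : solution member t
      = member.foldl (fun counter i =>
          if (10:Int) <= member.length then
            (if i < 20 then counter + PySem.Int.floordiv (b0 * 80) 100
             else if (20:Int) <= i then counter + PySem.Int.floordiv (o0 * 90) 100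
             else counter)
          else
            (if i < 20 then counter + b0
             else if (20:Int) <= i then counter + o0
             else counter)) 0) :
    solution member t
      = (member.countP (fun i => decide (i < 20)) : Int)
          * (if (10:Int) <= member.length then PySem.Int.floordiv (b0 * 80) 100 else b0)
        + (member.countP (fun i => decide ((20:Int) <= i)) : Int)
          * (if (10:Int) <= member.length then PySem.Int.floordiv (o0 * 90) 100 else o0) := by
  rw [ht]
  by_cases hlen : (10:Int) <= member.length
  · simp only [hlen, if_true]
    rw [fold_price]
    ring
  · simp only [hlen, if_false]
    rw [fold_price]
    ring

-- ===== VERDICT (by name: the statement is the Claim_ definition above) =====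
theorem solution_spec : Claim_equal_solution := by
  unfold Claim_equal_solution Spec_solution
  intro member t _
  by_cases hb : t = "bus"
  · subst hb
    refine solution_eq_alt_known member "bus" 15000 40000 (by decide) ?_
    exact solution_case member "bus" 15000 40000 (by unfold solution; simp)
  · by_cases hs : t = "ship"
    · subst hs
      refine solution_eq_alt_known member "ship" 13000 30000 (by decide) ?_
      exact solution_case member "ship" 13000 30000 (by unfold solution; simp)
    · by_cases ha : t = "airplane"
      · subst ha
        refine solution_eq_alt_known member "airplane" 45000 70000 (by decide) ?_
        exact solution_case member "airplane" 45000 70000 (by unfold solution; simp)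
      · have hnone : pvPriceTable.get? t = none := by
          simp only [pvPriceTable, PySem.Dict.get?, PySem.Dict.insert, PySem.Dict.empty]
          simp
          exact ⟨fun h => hb h.symm, fun h => hs h.symm, fun h => ha h.symm⟩
        unfold solution solution_alt
        rw [hnone]
        simp [hb, hs, ha]
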